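-- pv_equiv track=rewrite | github.com/araj89/NLP_ExtractContractInfo | maddress.py | convert_pkl_spacy_format
-- ===== SOURCE A (Python) =====
-- LABEL = "MADDRESS"
--
-- def convert_pkl_spacy_format(dataset_list):
--     dataset_spacy = []
--     for rec in dataset_list:
--         sent = ''
--         start_char = []
--         end_char = []
--         idx = 0
--         for part1 in rec:
--             word = part1[0][0]
--             cls = part1[1]
--
--             if word[0] != ',' and word[0] != '.':
--                 word = ' ' + word
--             sent = sent + word
--             if cls == 'B-GPE':
--                 if len(start_char) > len(end_char):
--                     end_char.append(idx)
--                 start_char.append(idx)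
--             if len(start_char) > len(end_char) and cls == 'O':
--                 end_char.append(idx-1)
--
--             idx += len(word)
--
--         if len(start_char) > len(end_char):
--             end_char.append(idx)
--
--         ents = []
--         for i in range(len(start_char)):
--             ents.append((start_char[i], end_char[i], LABEL))
--
--         sent = sent[1:]
--         dataset_spacy.append((sent, {"entities" : ents}))
--
--     return dataset_spacy
-- ===== SOURCE B (Python) =====
-- LABEL = "MADDRESS"
--
--
-- def _lead(word):
--     return word if word[0] in (',', '.') else ' ' + word
--
--
-- def _span_end(toks, total):
--     # end of a span opened before toks: first boundary token decides it
--     for off, cls in toks: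
--         if cls == 'B-GPE':
--             return off
--         if cls == 'O':
--             return off - 1
--     return total
--
--
-- def convert_pkl_spacy_format(dataset_list):
--     result = []
--     for rec in dataset_list:
--         words = [_lead(p[0][0]) for p in rec]
--         offs = []
--         total = 0
--         for w in words:
--             offs.append(total)
--             total += len(w)
--         toks = list(zip(offs, [p[1] for p in rec]))
--         ents = [(off, _span_end(toks[k + 1:], total), LABEL)
--                 for k, (off, cls) in enumerate(toks) if cls == 'B-GPE']
--         result.append((''.join(words)[1:], {"entities": ents}))
--     return result
-- ===== Notes on version B (the rewrite author's own statement) =====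
-- stated objective: alternative
-- what changed: Replaced A's incremental state machine that grows paired start_char/end_char lists in lockstep (zipped into entities by an index loop at the end) with a staged declarative computation: build the offset-annotated token list first, then emit exactly one span per B-GPE token whose end offset is found by an independent forward scan for the next boundary token (quadratic worst case).
import Mathlib
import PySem

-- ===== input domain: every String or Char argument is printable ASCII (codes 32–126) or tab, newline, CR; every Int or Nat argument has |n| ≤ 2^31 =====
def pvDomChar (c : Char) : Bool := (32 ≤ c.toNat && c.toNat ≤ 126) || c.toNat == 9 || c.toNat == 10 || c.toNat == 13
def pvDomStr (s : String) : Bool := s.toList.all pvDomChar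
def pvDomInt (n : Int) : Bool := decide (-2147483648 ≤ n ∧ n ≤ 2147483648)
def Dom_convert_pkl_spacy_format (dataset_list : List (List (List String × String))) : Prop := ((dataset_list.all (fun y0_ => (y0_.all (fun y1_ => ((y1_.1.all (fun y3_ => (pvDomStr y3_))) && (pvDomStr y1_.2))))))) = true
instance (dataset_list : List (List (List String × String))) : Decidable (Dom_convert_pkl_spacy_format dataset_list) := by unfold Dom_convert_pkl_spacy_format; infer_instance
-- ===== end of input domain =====

-- B replaces A's paired start/end offset lists (grown in lockstep by a single-pass state
-- machine and zipped at the end) with a staged declarative computation: first an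
-- offset-annotated token list, then one span per B-GPE token whose end is found by an
-- independent forward scan; objective: alternative algorithm, same return value.

def pvLABEL : String := "MADDRESS"

-- ===== PORT A =====
-- Sentences are carried as List Char (exact model of Python str concatenation/slicing;
-- packed back to String at the end).  word = part1[0][0] and word[0] are ported with
-- getD defaults; Pre_ excludes exactly the inputs where Python would raise IndexError there.
def pvWordA (part : List String × String) : List Char :=
  let word0 := ((PySem.List.pyGet? part.1 0).getD "").toList   -- part1[0][0]
  let c0 := (PySem.List.pyGet? word0 0).getD ' '               -- word[0]
  if c0 ≠ ',' ∧ c0 ≠ '.' then ' ' :: word0 else word0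

def pvAStep (st : List Char × List Int × List Int × Int) (part : List String × String) :
    List Char × List Int × List Int × Int :=
  let sent := st.1; let sc := st.2.1; let ec := st.2.2.1; let idx := st.2.2.2
  let word := pvWordA part
  let cls := part.2
  let sent := sent ++ word
  let ec := if cls = "B-GPE" ∧ sc.length > ec.length then ec ++ [idx] else ec
  let sc := if cls = "B-GPE" then sc ++ [idx] else sc
  let ec := if sc.length > ec.length ∧ cls = "O" then ec ++ [idx - 1] else ec
  (sent, sc, ec, idx + (word.length : Int))

def pvArec (rec : List (List String × String)) :
    String × List (String × List (Int × Int × String)) :=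
  let st := rec.foldl pvAStep ([], [], [], 0)
  let sent := st.1; let sc := st.2.1; let ec := st.2.2.1; let idx := st.2.2.2
  let ec := if sc.length > ec.length then ec ++ [idx] else ec
  let ents := (PySem.List.pyRange 0 (PySem.List.len sc) 1).foldl
      (fun acc i => acc ++ [(PySem.List.pyGetD sc i 0, PySem.List.pyGetD ec i 0, pvLABEL)]) []
  (String.ofList (PySem.List.slice sent (some 1) none), [("entities", ents)])

def convert_pkl_spacy_format (dataset_list : List (List (List String × String))) :
    List (String × (List (String × List (Int × Int × String)))) :=
  dataset_list.foldl (fun acc rec => acc ++ [pvArec rec]) []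

-- ===== PORT B =====
-- _lead(word)
def pvLead (p : List String × String) : List Char :=
  let w := ((PySem.List.pyGet? p.1 0).getD "").toList          -- p[0][0]
  let c0 := (PySem.List.pyGet? w 0).getD ' '                   -- word[0]
  if c0 = ',' ∨ c0 = '.' then w else ' ' :: w

-- _span_end(toks, total): the first boundary token decides the end of an open span
def pvSpanEnd (toks : List (Int × String)) (total : Int) : Int :=
  match toks with
  | [] => total
  | (off, cls) :: rest =>
    if cls = "B-GPE" then off
    else if cls = "O" then off - 1
    else pvSpanEnd rest total

-- the entity comprehension: one span per B-GPE token, end from the forward scan of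
-- toks[k+1:] (exactly the structural tail)
def pvEntsB (toks : List (Int × String)) (total : Int) : List (Int × Int × String) :=
  match toks with
  | [] => []
  | (off, cls) :: rest =>
    (if cls = "B-GPE" then [(off, pvSpanEnd rest total, pvLABEL)] else []) ++ pvEntsB rest total

def pvBrec (rec : List (List String × String)) :
    String × List (String × List (Int × Int × String)) :=
  let words := rec.map pvLead
  let ot := words.foldl (fun st w => (st.1 ++ [st.2], st.2 + (w.length : Int))) (([] : List Int), (0 : Int))
  let toks := ot.1.zip (rec.map (fun p => p.2))
  let ents := pvEntsB toks ot.2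
  (String.ofList (PySem.List.slice (PySem.Chars.join [] words) (some 1) none),
   [("entities", ents)])

def convert_pkl_spacy_format_alt (dataset_list : List (List (List String × String))) :
    List (String × (List (String × List (Int × Int × String)))) :=
  dataset_list.foldl (fun acc rec => acc ++ [pvBrec rec]) []

-- ===== PRECONDITION & SPEC =====
-- Pre_ excludes exactly the inputs on which Python A raises IndexError: a record part
-- whose first component is the empty list (part1[0][0]) or whose first word is the
-- empty string (word[0]).  B raises there too.
def Pre_convert_pkl_spacy_format (dataset_list : List (List (List String × String))) : Prop :=
  ∀ rec ∈ dataset_list, ∀ p ∈ rec, p.1 ≠ [] ∧ p.1.headD "" ≠ ""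
instance (dataset_list : List (List (List String × String))) : Decidable (Pre_convert_pkl_spacy_format dataset_list) := by unfold Pre_convert_pkl_spacy_format; infer_instance
def pvWitness_convert_pkl_spacy_format : (List (List (List String × String))) :=
  [[(["Hi"], "O"), (["New"], "B-GPE"), (["York"], "I-GPE"), ([","], "O")]]
def Spec_convert_pkl_spacy_format (dataset_list : List (List (List String × String))) (out : List (String × (List (String × List (Int × Int × String))))) : Prop := out = convert_pkl_spacy_format_alt dataset_list
instance (dataset_list : List (List (List String × String))) (out : List (String × (List (String × List (Int × Int × String))))) : Decidable (Spec_convert_pkl_spacy_format dataset_list out) := by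
  unfold Spec_convert_pkl_spacy_format
  exact @instDecidableEqList _ (instDecidableEqProd) out (convert_pkl_spacy_format_alt dataset_list)

-- ===== CLAIM (what is proved, stated in full; the proofs are below) =====
def Claim_equal_convert_pkl_spacy_format : Prop := ∀ (dataset_list : List (List (List String × String))), Dom_convert_pkl_spacy_format dataset_list → Pre_convert_pkl_spacy_format dataset_list → Spec_convert_pkl_spacy_format dataset_list (convert_pkl_spacy_format dataset_list)

-- ===== LEMMAS AND PROOFS =====

def pvZipL (s e : List Int) : List (Int × Int × String) :=
  (s.zip e).map (fun p => (p.1, p.2, pvLABEL))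

lemma pvZipL_append (s e : List Int) (a b : Int) (h : s.length = e.length) :
    pvZipL (s ++ [a]) (e ++ [b]) = pvZipL s e ++ [(a, b, pvLABEL)] := by
  simp [pvZipL, List.zip_append h]

lemma pvJoin_flatten (ps : List (List Char)) :
    PySem.Chars.join [] ps = ps.flatten := by
  induction ps with
  | nil => simp [PySem.Chars.join_nil]
  | cons a l ih =>
    cases l with
    | nil => simp [PySem.Chars.join_singleton]
    | cons b m => simp [PySem.Chars.join_cons_cons] at *; simp [ih]

lemma pvEntsFold_eq (sc ec : List Int) (h : sc.length = ec.length) :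
    (PySem.List.pyRange 0 (PySem.List.len sc) 1).foldl
      (fun acc i => acc ++ [(PySem.List.pyGetD sc i 0, PySem.List.pyGetD ec i 0, pvLABEL)]) []
      = pvZipL sc ec := by
  rw [PySem.List.foldl_append_singleton_eq_map]
  have hlen : PySem.List.len sc = PySem.List.len (pvZipL sc ec) := by
    simp [PySem.List.len_eq, pvZipL, h]
  rw [hlen, List.nil_append]
  have hcong : ∀ i ∈ PySem.List.pyRange 0 (PySem.List.len (pvZipL sc ec)) 1,
      (PySem.List.pyGetD sc i 0, PySem.List.pyGetD ec i 0, pvLABEL)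
        = PySem.List.pyGetD (pvZipL sc ec) i (0, 0, pvLABEL) := by
    intro i hi
    rw [PySem.List.mem_pyRange_one] at hi
    have h1 : i < ((pvZipL sc ec).length : Int) := by
      simpa [PySem.List.len_eq] using hi.2
    have hz : (pvZipL sc ec).length = sc.length := by simp [pvZipL, h]
    have hsc : i < (sc.length : Int) := by omega
    have hec : i < (ec.length : Int) := by omega
    rw [PySem.List.pyGetD_eq_getElem sc 0 hi.1 hsc,
        PySem.List.pyGetD_eq_getElem ec 0 hi.1 hec,
        PySem.List.pyGetD_eq_getElem (pvZipL sc ec) (0, 0, pvLABEL) hi.1 h1]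
    simp [pvZipL]
  rw [List.map_congr_left hcong, PySem.List.map_pyGetD_pyRange_zero]

-- the word A computes each step equals B's _lead
lemma pvWordA_eq (p : List String × String) : pvWordA p = pvLead p := by
  simp only [pvWordA, pvLead]
  by_cases h1 : ((PySem.List.pyGet? ((PySem.List.pyGet? p.1 0).getD "").toList 0).getD ' ') = ','
  · simp [h1]
  · by_cases h2 : ((PySem.List.pyGet? ((PySem.List.pyGet? p.1 0).getD "").toList 0).getD ' ') = '.'
    · simp [h2]
    · simp [h1, h2]

-- offset-annotated tokens (proof-side characterisation of B's toks)
def pvToks (ts : List (List String × String)) (idx : Int) : List (Int × String) :=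
  match ts with
  | [] => []
  | p :: r => (idx, p.2) :: pvToks r (idx + ((pvLead p).length : Int))

def pvOffList (ws : List (List Char)) (t0 : Int) : List Int :=
  match ws with
  | [] => []
  | w :: r => t0 :: pvOffList r (t0 + (w.length : Int))

def pvSumLen (ws : List (List Char)) : Int :=
  match ws with
  | [] => 0
  | w :: r => (w.length : Int) + pvSumLen r

lemma pvOffs_fold (ws : List (List Char)) (acc : List Int) (t0 : Int) :
    ws.foldl (fun st w => (st.1 ++ [st.2], st.2 + (w.length : Int))) (acc, t0)
      = (acc ++ pvOffList ws t0, t0 + pvSumLen ws) := by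
  induction ws generalizing acc t0 with
  | nil => simp [pvOffList, pvSumLen]
  | cons w r ih =>
    simp only [List.foldl_cons, pvOffList, pvSumLen]
    rw [ih]
    simp only [Prod.mk.injEq]
    exact ⟨by simp, by ring⟩

lemma pvToks_zip (rec : List (List String × String)) (t0 : Int) :
    (pvOffList (rec.map pvLead) t0).zip (rec.map (fun p => p.2)) = pvToks rec t0 := by
  induction rec generalizing t0 with
  | nil => simp [pvOffList, pvToks]
  | cons p r ih => simp [pvOffList, pvToks, ih]

-- A's end-of-record flush of end_char
def pvFlush (st : List Char × List Int × List Int × Int) : List Int :=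
  if st.2.1.length > st.2.2.1.length then st.2.2.1 ++ [st.2.2.2] else st.2.2.1

-- what the main induction asserts about A's final state
def pvPost (st : List Char × List Int × List Int × Int) (sent : List Char)
    (ts : List (List String × String)) (idx : Int) (z : List (Int × Int × String)) : Prop :=
  st.1 = sent ++ (ts.map pvLead).flatten ∧
  st.2.2.2 = idx + pvSumLen (ts.map pvLead) ∧
  st.2.1.length = (pvFlush st).length ∧
  pvZipL st.2.1 (pvFlush st) = z

-- MAIN LEMMA: A's fold, started closed (resp. open with pending start j), produces after
-- flushing exactly the already-emitted spans plus B's declarative spans of the suffix.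
lemma pvMain (ts : List (List String × String)) :
    (∀ (sent : List Char) (idx : Int) (sc ec : List Int), sc.length = ec.length →
      pvPost (ts.foldl pvAStep (sent, sc, ec, idx)) sent ts idx
        (pvZipL sc ec ++ pvEntsB (pvToks ts idx) (idx + pvSumLen (ts.map pvLead))))
    ∧ (∀ (sent : List Char) (idx : Int) (s' : List Int) (j : Int) (ec : List Int),
        s'.length = ec.length →
      pvPost (ts.foldl pvAStep (sent, s' ++ [j], ec, idx)) sent ts idx
        (pvZipL s' ec ++ (j, pvSpanEnd (pvToks ts idx) (idx + pvSumLen (ts.map pvLead)), pvLABEL)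
            :: pvEntsB (pvToks ts idx) (idx + pvSumLen (ts.map pvLead)))) := by
  induction ts with
  | nil =>
    constructor
    · intro sent idx sc ec h
      have hng : ¬ sc.length > ec.length := by omega
      refine ⟨by simp, by simp [pvSumLen], ?_, ?_⟩ <;>
        simp [pvFlush, pvEntsB, pvToks, pvSumLen, h]
    · intro sent idx s' j ec h
      have hg : (s' ++ [j]).length > ec.length := by simp; omega
      refine ⟨by simp, by simp [pvSumLen], ?_, ?_⟩
      · simp only [pvFlush, List.foldl_nil, if_pos hg]
        simp
        omega
      · simp only [pvFlush, List.foldl_nil, if_pos hg]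
        simp only [List.map_nil, pvSumLen, add_zero, pvToks, pvEntsB, pvSpanEnd]
        rw [pvZipL_append s' ec j idx h]
  | cons p r ih =>
    obtain ⟨ihC, ihO⟩ := ih
    constructor
    · intro sent idx sc ec h
      by_cases hB : p.2 = "B-GPE"
      · have hstep : pvAStep (sent, sc, ec, idx) p
            = (sent ++ pvLead p, sc ++ [idx], ec, idx + ((pvLead p).length : Int)) := by
          have hng : ¬ sc.length > ec.length := by omega
          simp [pvAStep, pvWordA_eq, hB, hng]
        rw [List.foldl_cons, hstep]
        obtain ⟨h1, h2, h3, h4⟩ := ihO (sent ++ pvLead p) (idx + ((pvLead p).length : Int)) sc idx ec h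
        refine ⟨by rw [h1]; simp, by simp only [List.map_cons, pvSumLen]; omega, h3, ?_⟩
        rw [h4]
        simp only [pvToks, pvEntsB, hB, List.map_cons, pvSumLen]
        have : idx + ((pvLead p).length + pvSumLen (r.map pvLead))
            = idx + (pvLead p).length + pvSumLen (r.map pvLead) := by ring
        rw [this]; simp
      · have hstep : pvAStep (sent, sc, ec, idx) p
            = (sent ++ pvLead p, sc, ec, idx + ((pvLead p).length : Int)) := by
          have hng : ¬ sc.length > ec.length := by omega
          simp [pvAStep, pvWordA_eq, hB, hng]
        rw [List.foldl_cons, hstep]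
        obtain ⟨h1, h2, h3, h4⟩ := ihC (sent ++ pvLead p) (idx + ((pvLead p).length : Int)) sc ec h
        refine ⟨by rw [h1]; simp, by simp only [List.map_cons, pvSumLen]; omega, h3, ?_⟩
        rw [h4]
        simp only [pvToks, pvEntsB, hB, List.map_cons, pvSumLen]
        have : idx + ((pvLead p).length + pvSumLen (r.map pvLead))
            = idx + (pvLead p).length + pvSumLen (r.map pvLead) := by ring
        rw [this]; simp
    · intro sent idx s' j ec h
      have hg : (s' ++ [j]).length > ec.length := by simp; omega
      by_cases hB : p.2 = "B-GPE"
      · have hstep : pvAStep (sent, s' ++ [j], ec, idx) p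
            = (sent ++ pvLead p, (s' ++ [j]) ++ [idx], ec ++ [idx],
               idx + ((pvLead p).length : Int)) := by
          have hO : p.2 ≠ "O" := by rw [hB]; decide
          simp [pvAStep, pvWordA_eq, hB]
          all_goals omega
        rw [List.foldl_cons, hstep]
        obtain ⟨h1, h2, h3, h4⟩ := ihO (sent ++ pvLead p) (idx + ((pvLead p).length : Int))
          (s' ++ [j]) idx (ec ++ [idx]) (by simp [h])
        refine ⟨by rw [h1]; simp, by simp only [List.map_cons, pvSumLen]; omega, h3, ?_⟩
        rw [h4, pvZipL_append s' ec j idx h]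
        simp only [pvToks, pvEntsB, pvSpanEnd, hB, List.map_cons, pvSumLen]
        have : idx + ((pvLead p).length + pvSumLen (r.map pvLead))
            = idx + (pvLead p).length + pvSumLen (r.map pvLead) := by ring
        rw [this]; simp
      · by_cases hO : p.2 = "O"
        · have hstep : pvAStep (sent, s' ++ [j], ec, idx) p
              = (sent ++ pvLead p, s' ++ [j], ec ++ [idx - 1],
                 idx + ((pvLead p).length : Int)) := by
            simp [pvAStep, pvWordA_eq, hO]
            all_goals omega
          rw [List.foldl_cons, hstep]
          obtain ⟨h1, h2, h3, h4⟩ := ihC (sent ++ pvLead p) (idx + ((pvLead p).length : Int))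
            (s' ++ [j]) (ec ++ [idx - 1]) (by simp [h])
          refine ⟨by rw [h1]; simp, by simp only [List.map_cons, pvSumLen]; omega, h3, ?_⟩
          rw [h4, pvZipL_append s' ec j (idx - 1) h]
          simp only [pvToks, pvEntsB, pvSpanEnd, hO, List.map_cons, pvSumLen]
          have : idx + ((pvLead p).length + pvSumLen (r.map pvLead))
              = idx + (pvLead p).length + pvSumLen (r.map pvLead) := by ring
          rw [this]; simp
        · have hstep : pvAStep (sent, s' ++ [j], ec, idx) p
              = (sent ++ pvLead p, s' ++ [j], ec, idx + ((pvLead p).length : Int)) := by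
            simp [pvAStep, pvWordA_eq, hB, hO]
          rw [List.foldl_cons, hstep]
          obtain ⟨h1, h2, h3, h4⟩ := ihO (sent ++ pvLead p) (idx + ((pvLead p).length : Int))
            s' j ec h
          refine ⟨by rw [h1]; simp, by simp only [List.map_cons, pvSumLen]; omega, h3, ?_⟩
          rw [h4]
          simp only [pvToks, pvEntsB, pvSpanEnd, List.map_cons, pvSumLen,
            if_neg hB, if_neg hO]
          have : idx + ((pvLead p).length + pvSumLen (r.map pvLead))
              = idx + (pvLead p).length + pvSumLen (r.map pvLead) := by ring
          rw [this]; simp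

lemma pvRec_eq (rec : List (List String × String)) : pvArec rec = pvBrec rec := by
  obtain ⟨h1, h2, h3, h4⟩ := (pvMain rec).1 [] 0 [] [] rfl
  unfold pvArec pvBrec
  rcases hA : rec.foldl pvAStep ([], [], [], 0) with ⟨sent, sc, ec, idx⟩
  rw [hA] at h1 h2 h3 h4
  simp only at h1 h2 h3 h4 ⊢
  simp only [pvOffs_fold, List.nil_append, zero_add, pvToks_zip, pvJoin_flatten]
  have hflush : pvFlush (sent, sc, ec, idx)
      = if sc.length > ec.length then ec ++ [idx] else ec := rfl
  rw [hflush] at h3 h4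
  have h4' : pvZipL sc (if sc.length > ec.length then ec ++ [idx] else ec)
      = pvEntsB (pvToks rec 0) (pvSumLen (List.map pvLead rec)) := by
    rw [h4]; simp [pvZipL]
  rw [pvEntsFold_eq sc _ h3, h4', h1]
  simp

theorem pvPorts_eq (ds : List (List (List String × String))) :
    convert_pkl_spacy_format ds = convert_pkl_spacy_format_alt ds := by
  unfold convert_pkl_spacy_format convert_pkl_spacy_format_alt
  have h : pvArec = pvBrec := funext pvRec_eq
  rw [h]

-- ===== VERDICT (by name: the statement is the Claim_ definition above) =====
theorem convert_pkl_spacy_format_spec : Claim_equal_convert_pkl_spacy_format := by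
  intro ds _ _
  unfold Spec_convert_pkl_spacy_format
  exact pvPorts_eq ds
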